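-- pv_equiv track=rewrite | github.com/Fasero11/Mecatronica-Proyecto | music/get_song_notes.py | convert_clave_sol_to_numbers
-- ===== SOURCE A (Python) =====
-- def convert_clave_sol_to_numbers(notes):
--     # Asignar números a las notas en función de la tabla de equivalencia
--     equivalence_table = {
--         'Do0': 1,  'Do#0': 2,  'Re0': 19, 'Re#0': 20, 'Mi0': 37, 'Fa0': 46, 'Fa#0': 47, 'Sol0': 64, 'Sol#0': 65, 'La0': 82, 'La#0': 83, 'Si0': 100,
--         'Do1': 3,  'Do#1': 4,  'Re1': 21, 'Re#1': 22, 'Mi1': 38, 'Fa1': 48, 'Fa#1': 49, 'Sol1': 66, 'Sol#1': 67, 'La1': 84, 'La#1': 85, 'Si1': 101,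
--         'Do2': 5,  'Do#2': 6,  'Re2': 23, 'Re#2': 24, 'Mi2': 39, 'Fa2': 50, 'Fa#2': 51, 'Sol2': 68, 'Sol#2': 69, 'La2': 86, 'La#2': 87, 'Si2': 102,
--         'Do3': 7,  'Do#3': 8,  'Re3': 25, 'Re#3': 26, 'Mi3': 40, 'Fa3': 52, 'Fa#3': 53, 'Sol3': 70, 'Sol#3': 71, 'La3': 88, 'La#3': 89, 'Si3': 103,
--         'Do4': 9,  'Do#4': 10, 'Re4': 27, 'Re#4': 28, 'Mi4': 41, 'Fa4': 54, 'Fa#4': 55, 'Sol4': 72, 'Sol#4': 73, 'La4': 90, 'La#4': 91, 'Si4': 104,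
--         'Do5': 11, 'Do#5': 12, 'Re5': 29, 'Re#5': 30, 'Mi5': 42, 'Fa5': 56, 'Fa#5': 57, 'Sol5': 74, 'Sol#5': 75, 'La5': 92, 'La#5': 93, 'Si5': 105,
--         'Do6': 13, 'Do#6': 14, 'Re6': 31, 'Re#6': 32, 'Mi6': 43, 'Fa6': 58, 'Fa#6': 59, 'Sol6': 76, 'Sol#6': 77, 'La6': 94, 'La#6': 95, 'Si6': 106,
--         'Do7': 15, 'Do#7': 16, 'Re7': 33, 'Re#7': 34, 'Mi7': 44, 'Fa7': 60, 'Fa#7': 61, 'Sol7': 78, 'Sol#7': 79, 'La7': 96, 'La#7': 97, 'Si7': 107,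
--         'Do8': 17, 'Do#8': 18, 'Re8': 35, 'Re#8': 36, 'Mi8': 45, 'Fa8': 62, 'Fa#8': 63, 'Sol8': 80, 'Sol#8': 81, 'La8': 98, 'La#8': 99, 'Si8': 108
--     }
--
--     converted_notes = []
--     for note in notes:
--         if note in equivalence_table:
--             converted_notes.append(equivalence_table[note])
--     return converted_notes
-- ===== SOURCE B (Python) =====
-- # Arithmetic decomposition: 12-entry base table + per-octave stride instead of a full 108-key dict.
-- BASE = {'Do': 1, 'Do#': 2, 'Re': 19, 'Re#': 20, 'Mi': 37, 'Fa': 46,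
--         'Fa#': 47, 'Sol': 64, 'Sol#': 65, 'La': 82, 'La#': 83, 'Si': 100}
--
-- def convert_clave_sol_to_numbers(notes):
--     out = []
--     for note in notes:
--         name = note[:-1]
--         oct_s = note[-1:]
--         if name in BASE and len(oct_s) == 1 and '0' <= oct_s <= '8':
--             stride = 1 if name in ('Mi', 'Si') else 2
--             out.append(BASE[name] + stride * (ord(oct_s) - 48))
--     return out
-- ===== Notes on version B (the rewrite author's own statement) =====
-- stated objective: alternative
-- what changed: Replaces the 108-entry octave-by-octave lookup table rebuilt on every call with a 12-entry base-name table plus arithmetic (base + stride*octave on the parsed name and octave character, stride 1 for Mi/Si else 2).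
import Mathlib
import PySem

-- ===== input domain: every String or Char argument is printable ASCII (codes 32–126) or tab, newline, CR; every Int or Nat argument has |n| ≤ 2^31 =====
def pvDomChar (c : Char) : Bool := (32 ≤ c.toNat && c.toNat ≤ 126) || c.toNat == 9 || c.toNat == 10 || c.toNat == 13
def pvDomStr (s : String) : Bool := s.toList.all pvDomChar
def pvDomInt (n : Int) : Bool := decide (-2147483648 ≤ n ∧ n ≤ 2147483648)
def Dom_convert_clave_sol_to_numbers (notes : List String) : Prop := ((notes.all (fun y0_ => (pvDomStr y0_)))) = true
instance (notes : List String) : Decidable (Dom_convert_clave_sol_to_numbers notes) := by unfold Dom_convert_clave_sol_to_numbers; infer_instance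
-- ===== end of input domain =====

set_option maxRecDepth 40000

-- B replaces A's 108-entry lookup table by a 12-entry base table plus per-octave arithmetic (alternative decomposition).

-- ===== PORT A =====
-- A's literal equivalence table (hoisted as a helper; A builds it on every call)
def pvTable : PySem.Dict String Int := PySem.Dict.ofList [
    ("Do0", 1), ("Do#0", 2), ("Re0", 19), ("Re#0", 20), ("Mi0", 37), ("Fa0", 46),
    ("Fa#0", 47), ("Sol0", 64), ("Sol#0", 65), ("La0", 82), ("La#0", 83), ("Si0", 100),
    ("Do1", 3), ("Do#1", 4), ("Re1", 21), ("Re#1", 22), ("Mi1", 38), ("Fa1", 48),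
    ("Fa#1", 49), ("Sol1", 66), ("Sol#1", 67), ("La1", 84), ("La#1", 85), ("Si1", 101),
    ("Do2", 5), ("Do#2", 6), ("Re2", 23), ("Re#2", 24), ("Mi2", 39), ("Fa2", 50),
    ("Fa#2", 51), ("Sol2", 68), ("Sol#2", 69), ("La2", 86), ("La#2", 87), ("Si2", 102),
    ("Do3", 7), ("Do#3", 8), ("Re3", 25), ("Re#3", 26), ("Mi3", 40), ("Fa3", 52),
    ("Fa#3", 53), ("Sol3", 70), ("Sol#3", 71), ("La3", 88), ("La#3", 89), ("Si3", 103),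
    ("Do4", 9), ("Do#4", 10), ("Re4", 27), ("Re#4", 28), ("Mi4", 41), ("Fa4", 54),
    ("Fa#4", 55), ("Sol4", 72), ("Sol#4", 73), ("La4", 90), ("La#4", 91), ("Si4", 104),
    ("Do5", 11), ("Do#5", 12), ("Re5", 29), ("Re#5", 30), ("Mi5", 42), ("Fa5", 56),
    ("Fa#5", 57), ("Sol5", 74), ("Sol#5", 75), ("La5", 92), ("La#5", 93), ("Si5", 105),
    ("Do6", 13), ("Do#6", 14), ("Re6", 31), ("Re#6", 32), ("Mi6", 43), ("Fa6", 58),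
    ("Fa#6", 59), ("Sol6", 76), ("Sol#6", 77), ("La6", 94), ("La#6", 95), ("Si6", 106),
    ("Do7", 15), ("Do#7", 16), ("Re7", 33), ("Re#7", 34), ("Mi7", 44), ("Fa7", 60),
    ("Fa#7", 61), ("Sol7", 78), ("Sol#7", 79), ("La7", 96), ("La#7", 97), ("Si7", 107),
    ("Do8", 17), ("Do#8", 18), ("Re8", 35), ("Re#8", 36), ("Mi8", 45), ("Fa8", 62),
    ("Fa#8", 63), ("Sol8", 80), ("Sol#8", 81), ("La8", 98), ("La#8", 99), ("Si8", 108)]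

def convert_clave_sol_to_numbers (notes : List String) : List Int :=
  notes.foldl (fun converted_notes note =>
    if pvTable.contains note then converted_notes ++ [pvTable.getD note 0]
    else converted_notes) []

-- ===== PORT B =====
-- B's 12-entry BASE dict, as a lookup helper (name ↦ octave-0 value)
def pvBase (name : String) : Option Int :=
  if name = "Do" then some 1 else if name = "Do#" then some 2
  else if name = "Re" then some 19 else if name = "Re#" then some 20
  else if name = "Mi" then some 37 else if name = "Fa" then some 46
  else if name = "Fa#" then some 47 else if name = "Sol" then some 64
  else if name = "Sol#" then some 65 else if name = "La" then some 82
  else if name = "La#" then some 83 else if name = "Si" then some 100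
  else none

def convert_clave_sol_to_numbers_alt (notes : List String) : List Int :=
  notes.foldl (fun out note =>
    match pvBase (PySem.Str.slice note none (some (-1))),              -- note[:-1]
          (PySem.Str.slice note (some (-1)) none).toList with          -- note[-1:]
    | some b, [c] =>
        if '0' ≤ c ∧ c ≤ '8' then
          out ++ [b + (if PySem.Str.slice note none (some (-1)) = "Mi" ∨
                          PySem.Str.slice note none (some (-1)) = "Si" then (1 : Int) else 2)
                      * ((c.toNat : Int) - 48)]
        else out
    | _, _ => out) []

-- ===== PRECONDITION & SPEC =====
def Spec_convert_clave_sol_to_numbers (notes : List String) (out : List Int) : Prop := out = convert_clave_sol_to_numbers_alt notes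
instance (notes : List String) (out : List Int) : Decidable (Spec_convert_clave_sol_to_numbers notes out) := by unfold Spec_convert_clave_sol_to_numbers; infer_instance

-- ===== CLAIM (what is proved, stated in full; the proofs are below) =====
def Claim_equal_convert_clave_sol_to_numbers : Prop := ∀ (notes : List String), Dom_convert_clave_sol_to_numbers notes → Spec_convert_clave_sol_to_numbers notes (convert_clave_sol_to_numbers notes)

-- ===== LEMMAS AND PROOFS =====

-- B's per-note step as an Option-valued function (some v ↔ the note is appended as v)
def pvBStep (note : String) : Option Int :=
  match pvBase (PySem.Str.slice note none (some (-1))), (PySem.Str.slice note (some (-1)) none).toList with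
  | some b, [c] =>
      if '0' ≤ c ∧ c ≤ '8' then
        some (b + (if PySem.Str.slice note none (some (-1)) = "Mi" ∨
                      PySem.Str.slice note none (some (-1)) = "Si" then (1 : Int) else 2)
                  * ((c.toNat : Int) - 48))
      else none
  | _, _ => none

def pvPairs : List (String × Int) := [
    ("Do0", 1), ("Do#0", 2), ("Re0", 19), ("Re#0", 20), ("Mi0", 37), ("Fa0", 46),
    ("Fa#0", 47), ("Sol0", 64), ("Sol#0", 65), ("La0", 82), ("La#0", 83), ("Si0", 100),
    ("Do1", 3), ("Do#1", 4), ("Re1", 21), ("Re#1", 22), ("Mi1", 38), ("Fa1", 48),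
    ("Fa#1", 49), ("Sol1", 66), ("Sol#1", 67), ("La1", 84), ("La#1", 85), ("Si1", 101),
    ("Do2", 5), ("Do#2", 6), ("Re2", 23), ("Re#2", 24), ("Mi2", 39), ("Fa2", 50),
    ("Fa#2", 51), ("Sol2", 68), ("Sol#2", 69), ("La2", 86), ("La#2", 87), ("Si2", 102),
    ("Do3", 7), ("Do#3", 8), ("Re3", 25), ("Re#3", 26), ("Mi3", 40), ("Fa3", 52),
    ("Fa#3", 53), ("Sol3", 70), ("Sol#3", 71), ("La3", 88), ("La#3", 89), ("Si3", 103),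
    ("Do4", 9), ("Do#4", 10), ("Re4", 27), ("Re#4", 28), ("Mi4", 41), ("Fa4", 54),
    ("Fa#4", 55), ("Sol4", 72), ("Sol#4", 73), ("La4", 90), ("La#4", 91), ("Si4", 104),
    ("Do5", 11), ("Do#5", 12), ("Re5", 29), ("Re#5", 30), ("Mi5", 42), ("Fa5", 56),
    ("Fa#5", 57), ("Sol5", 74), ("Sol#5", 75), ("La5", 92), ("La#5", 93), ("Si5", 105),
    ("Do6", 13), ("Do#6", 14), ("Re6", 31), ("Re#6", 32), ("Mi6", 43), ("Fa6", 58),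
    ("Fa#6", 59), ("Sol6", 76), ("Sol#6", 77), ("La6", 94), ("La#6", 95), ("Si6", 106),
    ("Do7", 15), ("Do#7", 16), ("Re7", 33), ("Re#7", 34), ("Mi7", 44), ("Fa7", 60),
    ("Fa#7", 61), ("Sol7", 78), ("Sol#7", 79), ("La7", 96), ("La#7", 97), ("Si7", 107),
    ("Do8", 17), ("Do#8", 18), ("Re8", 35), ("Re#8", 36), ("Mi8", 45), ("Fa8", 62),
    ("Fa#8", 63), ("Sol8", 80), ("Sol#8", 81), ("La8", 98), ("La#8", 99), ("Si8", 108)]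

def pvKeys : List String := ["Do0", "Do#0", "Re0", "Re#0", "Mi0", "Fa0", "Fa#0", "Sol0", "Sol#0", "La0", "La#0", "Si0", "Do1", "Do#1", "Re1", "Re#1", "Mi1", "Fa1", "Fa#1", "Sol1", "Sol#1", "La1", "La#1", "Si1", "Do2", "Do#2", "Re2", "Re#2", "Mi2", "Fa2", "Fa#2", "Sol2", "Sol#2", "La2", "La#2", "Si2", "Do3", "Do#3", "Re3", "Re#3", "Mi3", "Fa3", "Fa#3", "Sol3", "Sol#3", "La3", "La#3", "Si3", "Do4", "Do#4", "Re4", "Re#4", "Mi4", "Fa4", "Fa#4", "Sol4", "Sol#4", "La4", "La#4", "Si4", "Do5", "Do#5", "Re5", "Re#5", "Mi5", "Fa5", "Fa#5", "Sol5", "Sol#5", "La5", "La#5", "Si5", "Do6", "Do#6", "Re6", "Re#6", "Mi6", "Fa6", "Fa#6", "Sol6", "Sol#6", "La6", "La#6", "Si6", "Do7", "Do#7", "Re7", "Re#7", "Mi7", "Fa7", "Fa#7", "Sol7", "Sol#7", "La7", "La#7", "Si7", "Do8", "Do#8", "Re8", "Re#8", "Mi8", "Fa8", "Fa#8", "Sol8",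 "Sol#8", "La8", "La#8", "Si8"]

set_option maxHeartbeats 2000000 in
theorem pvTable_eq : pvTable = PySem.Dict.mk pvPairs := by decide

set_option maxHeartbeats 2000000 in
theorem pvStep_eq_on_keys : ∀ s ∈ pvKeys, (PySem.Dict.mk pvPairs).get? s = pvBStep s := by decide

set_option maxHeartbeats 2000000 in
theorem pvKeys_eq : pvTable.keys = pvKeys := by rw [pvTable_eq]; decide

set_option maxHeartbeats 4000000 in
theorem pvBase_cases (n : String) (b : Int) (h : pvBase n = some b) :
    n = "Do" ∨ n = "Do#" ∨ n = "Re" ∨ n = "Re#" ∨ n = "Mi" ∨ n = "Fa" ∨ n = "Fa#" ∨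
    n = "Sol" ∨ n = "Sol#" ∨ n = "La" ∨ n = "La#" ∨ n = "Si" := by
  unfold pvBase at h
  split_ifs at h with h1 h2 h3 h4 h5 h6 h7 h8 h9 h10 h11 h12
  exacts [Or.inl h1, Or.inr (Or.inl h2), Or.inr (Or.inr (Or.inl h3)), Or.inr (Or.inr (Or.inr (Or.inl h4))), Or.inr (Or.inr (Or.inr (Or.inr (Or.inl h5)))), Or.inr (Or.inr (Or.inr (Or.inr (Or.inr (Or.inl h6))))), Or.inr (Or.inr (Or.inr (Or.inr (Or.inr (Or.inr (Or.inl h7)))))), Or.inr (Or.inr (Or.inr (Or.inr (Or.inr (Or.inr (Or.inr (Or.inl h8))))))), Or.inr (Or.inr (Or.inr (Or.inr (Or.inr (Or.inr (Or.inr (Or.inr (Or.inl h9)))))))), Or.inr (Or.inr (Or.inr (Or.inr (Or.inr (Or.inr (Or.inr (Or.inr (Or.inr (Or.inl h10))))))))), Or.inr (Or.inr (Or.inr (Or.inr (Or.inr (Or.inr (Or.inr (Or.inr (Or.inr (Or.inr (Or.inl h11)))))))))), Or.inr (Or.inr (Or.inr (Or.inr (Or.inr (Or.inr (Or.inr (Or.inr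 (Or.inr (Or.inr (Or.inr h12))))))))))]

theorem pvChar_cases (c : Char) (h1 : '0' ≤ c) (h2 : c ≤ '8') :
    c = '0' ∨ c = '1' ∨ c = '2' ∨ c = '3' ∨ c = '4' ∨ c = '5' ∨ c = '6' ∨ c = '7' ∨ c = '8' := by
  have l1 : 48 ≤ c.toNat := by simpa [Char.le_def, UInt32.le_iff_toNat_le] using h1
  have l2 : c.toNat ≤ 56 := by simpa [Char.le_def, UInt32.le_iff_toNat_le] using h2
  have h9 : c.toNat = 48 ∨ c.toNat = 49 ∨ c.toNat = 50 ∨ c.toNat = 51 ∨ c.toNat = 52 ∨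
      c.toNat = 53 ∨ c.toNat = 54 ∨ c.toNat = 55 ∨ c.toNat = 56 := by omega
  rcases h9 with h|h|h|h|h|h|h|h|h <;> rw [← Char.ofNat_toNat c, h] <;> decide

set_option maxHeartbeats 2000000 in
theorem pvBStep_mem (s : String) (v : Int) (h : pvBStep s = some v) : s ∈ pvKeys := by
  unfold pvBStep at h
  rcases hb : pvBase (PySem.Str.slice s none (some (-1))) with _ | b
  · simp [hb] at h
  rcases hoct : (PySem.Str.slice s (some (-1)) none).toList with _ | ⟨c, ctail⟩
  · simp [hb, hoct] at h
  cases ctail with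
  | cons d t => simp [hb, hoct] at h
  | nil =>
    simp only [hb, hoct] at h
    by_cases hc : '0' ≤ c ∧ c ≤ '8'
    · obtain ⟨h1, h2⟩ := hc
      have hs : s.toList = (PySem.Str.slice s none (some (-1))).toList ++ [c] := by
        have hdl : (PySem.Str.slice s none (some (-1))).toList = s.toList.dropLast :=
          PySem.Str.slice_to_neg_one s
        have hdr : (PySem.Str.slice s (some (-1)) none).toList
            = s.toList.drop (s.toList.length - 1) := by
          simp [PySem.Str.slice, PySem.List.slice_from_neg_one]
        rw [hdr] at hoct
        rw [hdl, List.dropLast_eq_take, ← hoct, List.take_append_drop]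
      have hofl : String.ofList s.toList = s := String.ofList_toList
      rcases pvBase_cases _ _ hb with hn|hn|hn|hn|hn|hn|hn|hn|hn|hn|hn|hn <;>
        rcases pvChar_cases c h1 h2 with hcc|hcc|hcc|hcc|hcc|hcc|hcc|hcc|hcc <;>
          subst hcc <;> rw [hn] at hs <;> rw [← hofl, hs] <;> decide
    · rw [if_neg hc] at h; exact absurd h (by simp)

theorem pvStep_eq (s : String) : pvTable.get? s = pvBStep s := by
  by_cases hm : s ∈ pvKeys
  · rw [pvTable_eq]; exact pvStep_eq_on_keys s hm
  · have hnone : pvTable.get? s = none := by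
      rw [PySem.Dict.get?_eq_none_iff_not_mem_keys, pvKeys_eq]; exact hm
    rcases hb : pvBStep s with _ | v
    · rw [hnone]
    · exact absurd (pvBStep_mem s v hb) hm

theorem pvFold_eq (notes : List String) (acc : List Int) :
    notes.foldl (fun converted_notes note =>
      if pvTable.contains note then converted_notes ++ [pvTable.getD note 0]
      else converted_notes) acc
    = notes.foldl (fun out note =>
        match pvBStep note with
        | some v => out ++ [v]
        | none => out) acc := by
  induction notes generalizing acc with
  | nil => rfl
  | cons n ns ih =>
      simp only [List.foldl_cons]
      rw [ih]
      congr 1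
      rw [PySem.Dict.contains_eq_isSome_get?, PySem.Dict.getD_eq_get?_getD, pvStep_eq]
      cases pvBStep n <;> rfl

theorem pvAlt_eq (notes : List String) :
    convert_clave_sol_to_numbers_alt notes
    = notes.foldl (fun out note =>
        match pvBStep note with
        | some v => out ++ [v]
        | none => out) [] := by
  unfold convert_clave_sol_to_numbers_alt
  congr 1
  funext out note
  unfold pvBStep
  rcases hb : pvBase (PySem.Str.slice note none (some (-1))) with _ | b <;>
    rcases ht : (PySem.Str.slice note (some (-1)) none).toList with _ | ⟨c, _ | ⟨d, t⟩⟩ <;>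
      simp only [hb, ht] <;> first | rfl | (split_ifs <;> rfl)

-- ===== VERDICT (by name: the statement is the Claim_ definition above) =====
theorem convert_clave_sol_to_numbers_spec : Claim_equal_convert_clave_sol_to_numbers := by
  intro notes _
  unfold Spec_convert_clave_sol_to_numbers convert_clave_sol_to_numbers
  rw [pvFold_eq, pvAlt_eq]
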